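-- pv_equiv track=rewrite | github.com/snowlaxc/coding_practice | 프로그래머스/1/42840. 모의고사/모의고사.py | solution
-- ===== SOURCE A (Python) =====
-- def solution(answers):
--     student_1 = [1, 2, 3, 4, 5]
--     student_2 = [2, 1, 2, 3, 2, 4, 2, 5]
--     student_3 = [3, 3, 1, 1, 2, 2, 4, 4, 5, 5]
--
--     score_1 = 0
--     score_2 = 0
--     score_3 = 0
--
--     for i in range(len(answers)):
--         if answers[i] == student_1[i%5]:
--             score_1 += 1
--         if answers[i] == student_2[i%8]:
--             score_2 += 1
--         if answers[i] == student_3[i%10]: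
--             score_3 += 1
--
--     result = max(score_1, score_2, score_3)
--
--     answer = []
--
--     if score_1 == result:
--         answer.append(1)
--     if score_2 == result:
--         answer.append(2)
--     if score_3 == result:
--         answer.append(3)
--
--     return answer
-- ===== SOURCE B (Python) =====
-- def solution(answers):
--     patterns = [[1, 2, 3, 4, 5],
--                 [2, 1, 2, 3, 2, 4, 2, 5],
--                 [3, 3, 1, 1, 2, 2, 4, 4, 5, 5]]
--     # 40 = lcm(5, 8, 10): every pattern's guess is constant on each residue class mod 40,
--     # so bucket the answers by index mod 40 once, then score by value-counting per bucket.
--     buckets = [[] for _ in range(40)]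
--     for i, a in enumerate(answers):
--         buckets[i % 40].append(a)
--     scores = [sum(buckets[r].count(p[r % len(p)]) for r in range(40))
--               for p in patterns]
--     best = max(scores)
--     return [k + 1 for k, s in enumerate(scores) if s == best]
-- ===== Notes on version B (the rewrite author's own statement) =====
-- stated objective: alternative
-- what changed: Replaces A's single interleaved per-index loop (three counters bumped by modulo-indexed equality tests) with a two-stage grouping algorithm: one pass buckets the answers by index mod 40 (the lcm of the pattern lengths, where each pattern's guess is constant per residue class), then each score is obtained by list.count of the pattern's guess in each bucket, and the winners are read off uniformly from enumerate(scores) against max(scores).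
import Mathlib
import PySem

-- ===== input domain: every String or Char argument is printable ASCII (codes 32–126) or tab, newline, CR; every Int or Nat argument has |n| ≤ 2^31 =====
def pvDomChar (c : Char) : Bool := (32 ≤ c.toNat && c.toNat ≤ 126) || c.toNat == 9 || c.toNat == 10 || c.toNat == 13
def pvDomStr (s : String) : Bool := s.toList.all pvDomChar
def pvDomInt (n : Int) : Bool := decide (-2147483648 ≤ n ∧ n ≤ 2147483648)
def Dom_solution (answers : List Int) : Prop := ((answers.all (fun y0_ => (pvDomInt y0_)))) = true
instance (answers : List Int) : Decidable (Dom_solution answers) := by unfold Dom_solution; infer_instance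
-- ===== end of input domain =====

-- B replaces A's single interleaved per-index loop (three counters bumped by modulo-indexed
-- equality tests) with a grouping algorithm: bucket the answers once by index mod 40
-- (lcm of the pattern lengths), then score each pattern by counting its per-residue guess
-- value inside each bucket.

-- ===== PORT A =====
def solution (answers : List Int) : List Int :=
  let student1 : List Int := [1, 2, 3, 4, 5]
  let student2 : List Int := [2, 1, 2, 3, 2, 4, 2, 5]
  let student3 : List Int := [3, 3, 1, 1, 2, 2, 4, 4, 5, 5]
  let s := (PySem.List.enumerate answers).foldl
    (fun (s : Int × Int × Int) (ia : Int × Int) =>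
      ((if ia.2 = PySem.List.pyGetD student1 (PySem.Int.mod ia.1 5) 0 then s.1 + 1 else s.1),
       (if ia.2 = PySem.List.pyGetD student2 (PySem.Int.mod ia.1 8) 0 then s.2.1 + 1 else s.2.1),
       (if ia.2 = PySem.List.pyGetD student3 (PySem.Int.mod ia.1 10) 0 then s.2.2 + 1 else s.2.2)))
    (0, 0, 0)
  let result := max s.1 (max s.2.1 s.2.2)
  (if s.1 = result then [1] else []) ++
  (if s.2.1 = result then [2] else []) ++
  (if s.2.2 = result then [3] else [])

-- ===== PORT B =====
-- buckets[i % 40].append(a): i % 40 lies in [0, 40), so the Nat index (mod i 40).toNat with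
-- List.modify is exactly Python's in-place list indexing here.
def solution_alt (answers : List Int) : List Int :=
  let patterns : List (List Int) :=
    [[1, 2, 3, 4, 5], [2, 1, 2, 3, 2, 4, 2, 5], [3, 3, 1, 1, 2, 2, 4, 4, 5, 5]]
  let buckets := (PySem.List.enumerate answers).foldl
    (fun (B : List (List Int)) (ia : Int × Int) =>
      B.modify (PySem.Int.mod ia.1 40).toNat (fun b => b ++ [ia.2]))
    (List.replicate 40 ([] : List Int))
  let scores := patterns.map (fun p =>
    ((PySem.List.pyRange 0 40 1).map (fun r =>
      ((PySem.List.pyGetD buckets r []).count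
        (PySem.List.pyGetD p (PySem.Int.mod r (p.length : Int)) 0) : Int))).sum)
  let best := (PySem.List.max? scores id).getD 0
  (PySem.List.enumerate scores).filterMap
    (fun (is : Int × Int) => if is.2 = best then some (is.1 + 1) else none)

-- ===== PRECONDITION & SPEC =====
def Spec_solution (answers : List Int) (out : List Int) : Prop := out = solution_alt answers
instance (answers : List Int) (out : List Int) : Decidable (Spec_solution answers out) := by unfold Spec_solution; infer_instance

-- ===== CLAIM (what is proved, stated in full; the proofs are below) =====
def Claim_equal_solution : Prop := ∀ (answers : List Int), Dom_solution answers → Spec_solution answers (solution answers)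

-- ===== LEMMAS AND PROOFS =====

-- A-side score of pattern p (modulus m) over answers enumerated from n
def pvGScore (p : List Int) (m : Int) (l : List Int) (n : Int) : Int :=
  ((PySem.List.enumerate l n).map
    (fun (ia : Int × Int) =>
      if ia.2 = PySem.List.pyGetD p (PySem.Int.mod ia.1 m) 0 then (1 : Int) else 0)).sum

-- the bucket-building fold of B, with open start index and start state
def pvBFold (l : List Int) (n : Int) (B : List (List Int)) : List (List Int) :=
  (PySem.List.enumerate l n).foldl
    (fun (B : List (List Int)) (ia : Int × Int) =>
      B.modify (PySem.Int.mod ia.1 40).toNat (fun b => b ++ [ia.2]))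
    B

lemma pv_fold_eq (l : List Int) (n a b c : Int) :
    (PySem.List.enumerate l n).foldl
      (fun (s : Int × Int × Int) (ia : Int × Int) =>
        ((if ia.2 = PySem.List.pyGetD [1, 2, 3, 4, 5] (PySem.Int.mod ia.1 5) 0 then s.1 + 1 else s.1),
         (if ia.2 = PySem.List.pyGetD [2, 1, 2, 3, 2, 4, 2, 5] (PySem.Int.mod ia.1 8) 0 then s.2.1 + 1 else s.2.1),
         (if ia.2 = PySem.List.pyGetD [3, 3, 1, 1, 2, 2, 4, 4, 5, 5] (PySem.Int.mod ia.1 10) 0 then s.2.2 + 1 else s.2.2)))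
      (a, b, c)
    = (a + pvGScore [1, 2, 3, 4, 5] 5 l n,
       b + pvGScore [2, 1, 2, 3, 2, 4, 2, 5] 8 l n,
       c + pvGScore [3, 3, 1, 1, 2, 2, 4, 4, 5, 5] 10 l n) := by
  induction l generalizing n a b c with
  | nil => simp [PySem.List.enumerate, pvGScore]
  | cons x t ih =>
    simp only [PySem.List.enumerate, pvGScore, List.foldl_cons, List.map_cons, List.sum_cons]
    rw [ih]
    simp only [pvGScore]
    split_ifs <;> simp <;> and_intros <;> ring1

lemma pv_bfold_length (l : List Int) (n : Int) (B : List (List Int)) :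
    (pvBFold l n B).length = B.length := by
  induction l generalizing n B with
  | nil => simp [pvBFold, PySem.List.enumerate]
  | cons x t ih =>
    simp only [pvBFold, PySem.List.enumerate, List.foldl_cons] at *
    rw [ih]
    exact List.length_modify ..

-- key grouping invariant: total per-residue value counts over the buckets = running match count
lemma pv_bucket_sum (v : Nat → Int) (l : List Int) (n : Int) (hn : 0 ≤ n)
    (B : List (List Int)) (hB : B.length = 40) :
    (∑ r ∈ Finset.range 40, ((pvBFold l n B).getD r []).count (v r) : Int)
    = (∑ r ∈ Finset.range 40, ((B.getD r []).count (v r) : Int))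
      + ((PySem.List.enumerate l n).map
          (fun (ia : Int × Int) =>
            if ia.2 = v (PySem.Int.mod ia.1 40).toNat then (1 : Int) else 0)).sum := by
  induction l generalizing n B with
  | nil => simp [pvBFold, PySem.List.enumerate]
  | cons x t ih =>
    have h40 : (0:Int) < 40 := by norm_num
    have hk0 : 0 ≤ PySem.Int.mod n 40 := PySem.Int.mod_nonneg n h40
    have hk40 : PySem.Int.mod n 40 < 40 := PySem.Int.mod_lt n h40
    have hcons : pvBFold (x :: t) n B
        = pvBFold t (n + 1) (B.modify (PySem.Int.mod n 40).toNat (fun b => b ++ [x])) := rfl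
    set k : Nat := (PySem.Int.mod n 40).toNat with hk
    have hklt : k < 40 := by omega
    rw [hcons, ih (n + 1) (by omega) _ (by rw [List.length_modify]; exact hB)]
    simp only [PySem.List.enumerate, List.map_cons, List.sum_cons]
    have hpt : ∀ r ∈ Finset.range 40,
        (((B.modify k (fun b => b ++ [x])).getD r []).count (v r) : Int)
        = ((B.getD r []).count (v r) : Int)
          + (if r = k then (if x = v k then (1:Int) else 0) else 0) := by
      intro r hr
      have hr40 : r < 40 := Finset.mem_range.mp hr
      rw [List.getD_eq_getElem?_getD, List.getD_eq_getElem?_getD, List.getElem?_modify]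
      by_cases hrk : r = k
      · rw [hrk]
        have hkB : k < B.length := by omega
        simp [List.getElem?_eq_getElem hkB, List.count_append, List.count_singleton]
      · simp [Ne.symm hrk, hrk]
    rw [Finset.sum_congr rfl hpt, Finset.sum_add_distrib, Finset.sum_ite_eq' (Finset.range 40) k]
    simp only [Finset.mem_range.mpr hklt, if_true]
    ring

-- the indicator sum of pv_bucket_sum is exactly the A-side score when the modulus divides 40
lemma pv_ind_eq (p : List Int) (m : Int) (hm : 0 < m) (hdvd : m ∣ 40)
    (l : List Int) (n : Int) (hn : 0 ≤ n) :
    ((PySem.List.enumerate l n).map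
        (fun (ia : Int × Int) =>
          if ia.2 = (fun r : Nat => PySem.List.pyGetD p (PySem.Int.mod (r : Int) m) 0)
              (PySem.Int.mod ia.1 40).toNat then (1 : Int) else 0)).sum
    = pvGScore p m l n := by
  induction l generalizing n with
  | nil => simp [PySem.List.enumerate, pvGScore]
  | cons x t ih =>
    simp only [PySem.List.enumerate, List.map_cons, List.sum_cons, pvGScore] at *
    rw [ih (n + 1) (by omega)]
    have h40 : (0:Int) < 40 := by norm_num
    have hcast : ((PySem.Int.mod n 40).toNat : Int) = PySem.Int.mod n 40 :=
      Int.toNat_of_nonneg (PySem.Int.mod_nonneg n h40)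
    have hmm : PySem.Int.mod (PySem.Int.mod n 40) m = PySem.Int.mod n m := by
      rw [PySem.Int.mod_eq_emod_of_pos h40, PySem.Int.mod_eq_emod_of_pos hm,
          PySem.Int.mod_eq_emod_of_pos hm]
      exact Int.emod_emod_of_dvd n hdvd
    simp only [hcast, hmm]

-- B's per-pattern bucket score equals the A-side score
lemma pv_bscore_eq (p : List Int) (m : Int) (hlen : (p.length : Int) = m) (hm : 0 < m)
    (hdvd : m ∣ 40) (answers : List Int) :
    ((PySem.List.pyRange 0 40 1).map (fun r =>
      ((PySem.List.pyGetD (pvBFold answers 0 (List.replicate 40 ([] : List Int))) r []).count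
        (PySem.List.pyGetD p (PySem.Int.mod r (p.length : Int)) 0) : Int))).sum
    = pvGScore p m answers 0 := by
  subst hlen
  have hrange : PySem.List.pyRange 0 40 1 = (List.range 40).map (fun n : Nat => (n : Int)) := by
    simp [PySem.List.pyRange_of_pos]
  have hlen : (pvBFold answers 0 (List.replicate 40 ([] : List Int))).length = 40 := by
    rw [pv_bfold_length]; simp
  rw [hrange, List.map_map]
  have hpt : ∀ r ∈ List.range 40,
      (((fun r => ((PySem.List.pyGetD (pvBFold answers 0 (List.replicate 40 ([] : List Int))) r []).count
        (PySem.List.pyGetD p (PySem.Int.mod r (p.length : Int)) 0) : Int)) ∘ (fun n : Nat => (n : Int))) r)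
      = (fun r : Nat => (((pvBFold answers 0 (List.replicate 40 ([] : List Int))).getD r []).count
          (PySem.List.pyGetD p (PySem.Int.mod (r : Int) (p.length : Int)) 0) : Int)) r := by
    intro r hr
    simp only [Function.comp_apply, PySem.List.pyGetD_natCast]
  rw [List.map_congr_left hpt]
  have hsum : ((List.range 40).map
      (fun r : Nat => (((pvBFold answers 0 (List.replicate 40 ([] : List Int))).getD r []).count
          (PySem.List.pyGetD p (PySem.Int.mod (r : Int) (p.length : Int)) 0) : Int))).sum
      = ∑ r ∈ Finset.range 40,
          (((pvBFold answers 0 (List.replicate 40 ([] : List Int))).getD r []).count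
            (PySem.List.pyGetD p (PySem.Int.mod (r : Int) (p.length : Int)) 0) : Int) := by
    exact Eq.symm (Finset.sum_range (fun r =>
      (((pvBFold answers 0 (List.replicate 40 ([] : List Int))).getD r []).count
        (PySem.List.pyGetD p (PySem.Int.mod (r : Int) (p.length : Int)) 0) : Int)))
  rw [hsum,
    pv_bucket_sum (fun r : Nat => PySem.List.pyGetD p (PySem.Int.mod (r : Int) (p.length : Int)) 0)
      answers 0 le_rfl _ (by simp)]
  rw [pv_ind_eq p (p.length : Int) hm hdvd answers 0 le_rfl,
    Finset.sum_eq_zero (fun r hr => by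
      rw [List.getD_eq_getElem?_getD, List.getElem?_replicate,
        if_pos (Finset.mem_range.mp hr)]
      simp),
    zero_add]

lemma pvBFold_def (l : List Int) :
    (PySem.List.enumerate l).foldl
      (fun (B : List (List Int)) (ia : Int × Int) =>
        B.modify (PySem.Int.mod ia.1 40).toNat (fun b => b ++ [ia.2]))
      (List.replicate 40 ([] : List Int))
    = pvBFold l 0 (List.replicate 40 ([] : List Int)) := rfl

lemma pv_max3 (s1 s2 s3 : Int) :
    (PySem.List.max? [s1, s2, s3] id).getD 0 = max s1 (max s2 s3) := by
  simp [PySem.List.max?]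
  split_ifs <;> simp_all <;> split_ifs <;> simp_all <;> omega

lemma pv_a_eq (answers : List Int) :
    solution answers =
      (if pvGScore [1, 2, 3, 4, 5] 5 answers 0
            = max (pvGScore [1, 2, 3, 4, 5] 5 answers 0)
                (max (pvGScore [2, 1, 2, 3, 2, 4, 2, 5] 8 answers 0)
                     (pvGScore [3, 3, 1, 1, 2, 2, 4, 4, 5, 5] 10 answers 0)) then [1] else []) ++
      (if pvGScore [2, 1, 2, 3, 2, 4, 2, 5] 8 answers 0
            = max (pvGScore [1, 2, 3, 4, 5] 5 answers 0)
                (max (pvGScore [2, 1, 2, 3, 2, 4, 2, 5] 8 answers 0)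
                     (pvGScore [3, 3, 1, 1, 2, 2, 4, 4, 5, 5] 10 answers 0)) then [2] else []) ++
      (if pvGScore [3, 3, 1, 1, 2, 2, 4, 4, 5, 5] 10 answers 0
            = max (pvGScore [1, 2, 3, 4, 5] 5 answers 0)
                (max (pvGScore [2, 1, 2, 3, 2, 4, 2, 5] 8 answers 0)
                     (pvGScore [3, 3, 1, 1, 2, 2, 4, 4, 5, 5] 10 answers 0)) then [3] else []) := by
  unfold solution
  simp only [pv_fold_eq, zero_add]

set_option maxHeartbeats 1000000 in
lemma pv_alt_eq (answers : List Int) :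
    solution_alt answers =
      (if pvGScore [1, 2, 3, 4, 5] 5 answers 0
            = max (pvGScore [1, 2, 3, 4, 5] 5 answers 0)
                (max (pvGScore [2, 1, 2, 3, 2, 4, 2, 5] 8 answers 0)
                     (pvGScore [3, 3, 1, 1, 2, 2, 4, 4, 5, 5] 10 answers 0)) then [1] else []) ++
      (if pvGScore [2, 1, 2, 3, 2, 4, 2, 5] 8 answers 0
            = max (pvGScore [1, 2, 3, 4, 5] 5 answers 0)
                (max (pvGScore [2, 1, 2, 3, 2, 4, 2, 5] 8 answers 0)
                     (pvGScore [3, 3, 1, 1, 2, 2, 4, 4, 5, 5] 10 answers 0)) then [2] else []) ++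
      (if pvGScore [3, 3, 1, 1, 2, 2, 4, 4, 5, 5] 10 answers 0
            = max (pvGScore [1, 2, 3, 4, 5] 5 answers 0)
                (max (pvGScore [2, 1, 2, 3, 2, 4, 2, 5] 8 answers 0)
                     (pvGScore [3, 3, 1, 1, 2, 2, 4, 4, 5, 5] 10 answers 0)) then [3] else []) := by
  unfold solution_alt
  simp only [List.map_cons, List.map_nil]
  rw [pvBFold_def]
  have h1 : ((([1, 2, 3, 4, 5] : List Int).length : Nat) : Int) = 5 := by decide
  have h2 : ((([2, 1, 2, 3, 2, 4, 2, 5] : List Int).length : Nat) : Int) = 8 := by decide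
  have h3 : ((([3, 3, 1, 1, 2, 2, 4, 4, 5, 5] : List Int).length : Nat) : Int) = 10 := by decide
  have e1 := pv_bscore_eq [1, 2, 3, 4, 5] 5 h1 (by norm_num) (by norm_num) answers
  have e2 := pv_bscore_eq [2, 1, 2, 3, 2, 4, 2, 5] 8 h2 (by norm_num) (by norm_num) answers
  have e3 := pv_bscore_eq [3, 3, 1, 1, 2, 2, 4, 4, 5, 5] 10 h3 (by norm_num) (by norm_num) answers
  simp only [e1, e2, e3, pv_max3]
  simp only [PySem.List.enumerate, List.filterMap_cons, List.filterMap_nil]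
  generalize pvGScore [1, 2, 3, 4, 5] 5 answers 0 = s1
  generalize pvGScore [2, 1, 2, 3, 2, 4, 2, 5] 8 answers 0 = s2
  generalize pvGScore [3, 3, 1, 1, 2, 2, 4, 4, 5, 5] 10 answers 0 = s3
  simp only [max_def]
  split_ifs <;> simp_all

-- ===== VERDICT (by name: the statement is the Claim_ definition above) =====
theorem solution_spec : Claim_equal_solution := by
  intro answers _
  unfold Spec_solution
  rw [pv_a_eq, pv_alt_eq]
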